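-- pv_equiv track=rewrite | github.com/MrBrantCode/unitest_baseline | mut_generate/mist_train_cf/cf_5091/solution.py | remove_duplicates_and_sort
-- ===== SOURCE A (Python) =====
-- def remove_duplicates_and_sort(string):
--     string = list(string)
--     n = len(string)
--     for i in range(n-1):
--         for j in range(i+1, n):
--             if string[i] > string[j]:
--                 string[i], string[j] = string[j], string[i]
--
--     i = 0
--     while i < n-1:
--         if string[i] == string[i+1]:
--             string.pop(i)
--             n -= 1
--         else:
--             i += 1
--
--     return ''.join(string)
-- ===== SOURCE B (Python) =====
-- def remove_duplicates_and_sort(string):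
--     # one pass: keep `result` sorted and duplicate-free while scanning the input once
--     result = []
--     for ch in string:
--         if ch not in result:
--             pos = 0
--             while pos < len(result) and result[pos] < ch:
--                 pos += 1
--             result.insert(pos, ch)
--     return ''.join(result)
-- ===== Notes on version B (the rewrite author's own statement) =====
-- stated objective: faster
-- what changed: Replaces A's O(n^2) double-loop swap sort followed by a separate adjacent-dedup while-loop with a single scan that maintains one sorted duplicate-free result list, inserting each unseen character at its sorted position.
import Mathlib
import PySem

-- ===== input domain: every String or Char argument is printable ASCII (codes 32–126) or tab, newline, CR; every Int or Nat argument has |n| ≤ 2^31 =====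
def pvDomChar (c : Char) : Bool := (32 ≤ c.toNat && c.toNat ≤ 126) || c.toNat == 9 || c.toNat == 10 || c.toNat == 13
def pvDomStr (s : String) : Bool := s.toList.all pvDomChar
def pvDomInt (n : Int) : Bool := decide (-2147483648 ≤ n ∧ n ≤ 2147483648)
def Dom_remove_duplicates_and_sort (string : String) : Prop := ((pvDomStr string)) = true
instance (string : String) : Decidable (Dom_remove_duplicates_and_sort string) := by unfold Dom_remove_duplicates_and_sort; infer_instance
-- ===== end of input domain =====

-- B fuses A's full swap sort + separate dedup scan into one pass keeping a sorted duplicate-free list.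

-- ===== PORT A =====
-- inner-loop body: 'if string[i] > string[j]: string[i], string[j] = string[j], string[i]'
def pvStepA (i : Int) (s : List Char) (j : Int) : List Char :=
  if PySem.List.pyGetD s j ' ' < PySem.List.pyGetD s i ' ' then
    PySem.List.pySetD (PySem.List.pySetD s i (PySem.List.pyGetD s j ' ')) j (PySem.List.pyGetD s i ' ')
  else s

-- 'while i < n-1: if string[i] == string[i+1]: string.pop(i); n -= 1 else: i += 1'
def pvDedupLoop (l : List Char) (i n : Int) : List Char :=
  if _h : i < n - 1 then
    if PySem.List.pyGetD l i ' ' = PySem.List.pyGetD l (i + 1) ' ' then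
      pvDedupLoop (((PySem.List.pop? l i).map (·.2)).getD l) i (n - 1)
    else
      pvDedupLoop l (i + 1) n
  else l
termination_by (n - i).toNat
decreasing_by all_goals omega

def remove_duplicates_and_sort (string : String) : String :=
  String.mk (pvDedupLoop
    ((PySem.List.pyRange 0 ((string.toList.length : Int) - 1) 1).foldl
      (fun s i => (PySem.List.pyRange (i + 1) (string.toList.length : Int) 1).foldl (pvStepA i) s)
      string.toList)
    0 (string.toList.length : Int))

-- ===== PORT B =====
-- 'pos = 0; while pos < len(result) and result[pos] < ch: pos += 1; result.insert(pos, ch)'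
def pvInsPos (c : Char) : List Char → List Char
  | [] => [c]
  | y :: ys => if y < c then y :: pvInsPos c ys else c :: y :: ys

def remove_duplicates_and_sort_alt (string : String) : String :=
  String.mk (string.toList.foldl (fun r c => if r.contains c then r else pvInsPos c r) [])

-- ===== PRECONDITION & SPEC =====
def Spec_remove_duplicates_and_sort (string : String) (out : String) : Prop := out = remove_duplicates_and_sort_alt string
instance (string : String) (out : String) : Decidable (Spec_remove_duplicates_and_sort string out) := by unfold Spec_remove_duplicates_and_sort; infer_instance

-- ===== CLAIM (what is proved, stated in full; the proofs are below) =====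
def Claim_equal_remove_duplicates_and_sort : Prop := ∀ (string : String), Dom_remove_duplicates_and_sort string → Spec_remove_duplicates_and_sort string (remove_duplicates_and_sort string)

-- ===== LEMMAS AND PROOFS =====

-- structural description of A's inner loop: one pass bubbling the minimum to the front
def pvPass (x : Char) : List Char → Char × List Char
  | [] => (x, [])
  | y :: ys =>
    if y < x then let p := pvPass y ys; (p.1, x :: p.2)
    else let p := pvPass x ys; (p.1, y :: p.2)

theorem pvPass_length (x : Char) (ys : List Char) : (pvPass x ys).2.length = ys.length := by
  induction ys generalizing x with
  | nil => rfl
  | cons y ys ih => simp only [pvPass]; split <;> simp [ih]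

-- structural description of A's double loop (selection-style sort)
def pvSSort : List Char → List Char
  | [] => []
  | x :: ys => (pvPass x ys).1 :: pvSSort (pvPass x ys).2
termination_by l => l.length
decreasing_by simp [pvPass_length]

-- structural description of A's dedup while-loop
def pvDAdj : List Char → List Char
  | [] => []
  | [x] => [x]
  | x :: y :: ys => if x = y then pvDAdj (y :: ys) else x :: pvDAdj (y :: ys)

theorem pvPass_perm (x : Char) (ys : List Char) :
    ((pvPass x ys).1 :: (pvPass x ys).2).Perm (x :: ys) := by
  induction ys generalizing x with
  | nil => rfl
  | cons y ys ih =>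
    simp only [pvPass]
    split
    · exact (List.Perm.swap x _ _).trans ((ih y).cons x)
    · exact ((List.Perm.swap y _ _).trans ((ih x).cons y)).trans (List.Perm.swap x y ys)

theorem pvPass_min (x : Char) (ys : List Char) :
    ∀ z ∈ x :: ys, (pvPass x ys).1 ≤ z := by
  induction ys generalizing x with
  | nil => intro z hz; simp at hz; simp [pvPass, hz]
  | cons y ys ih =>
    intro z hz
    simp only [pvPass]
    split
    · rename_i h
      rcases (by simpa using hz : z = x ∨ z = y ∨ z ∈ ys) with h1 | h1 | h1
      · exact le_trans (ih y y (by simp)) (le_of_lt (h1 ▸ h))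
      · exact ih y z (by simp [h1])
      · exact ih y z (by simp [h1])
    · rename_i h
      rcases (by simpa using hz : z = x ∨ z = y ∨ z ∈ ys) with h1 | h1 | h1
      · exact ih x z (by simp [h1])
      · exact le_trans (ih x x (by simp)) (h1 ▸ le_of_not_gt h)
      · exact ih x z (by simp [h1])

theorem pvSSort_perm (l : List Char) : (pvSSort l).Perm l := by
  induction l using pvSSort.induct with
  | case1 => simp [pvSSort]
  | case2 x ys ih =>
    rw [pvSSort]
    exact (ih.cons _).trans (pvPass_perm x ys)

theorem pvSSort_sorted (l : List Char) : (pvSSort l).Pairwise (· ≤ ·) := by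
  induction l using pvSSort.induct with
  | case1 => simp [pvSSort]
  | case2 x ys ih =>
    rw [pvSSort]
    refine List.pairwise_cons.2 ⟨?_, ih⟩
    intro z hz
    exact pvPass_min x ys z ((pvPass_perm x ys).subset (List.mem_cons_of_mem _ ((pvSSort_perm _).subset hz)))

theorem pvDAdj_mem (c : Char) (l : List Char) : c ∈ pvDAdj l ↔ c ∈ l := by
  induction l with
  | nil => simp [pvDAdj]
  | cons x t ih =>
    cases t with
    | nil => simp [pvDAdj]
    | cons y ys =>
      by_cases h : x = y
      · subst h
        rw [pvDAdj, if_pos rfl, ih]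
        simp
      · rw [pvDAdj, if_neg h]
        simp [ih]

theorem pvDAdj_sorted : ∀ (l : List Char), l.Pairwise (· ≤ ·) → (pvDAdj l).Pairwise (· < ·) := by
  intro l
  induction l with
  | nil => simp [pvDAdj]
  | cons x t ih =>
    cases t with
    | nil => simp [pvDAdj]
    | cons y ys =>
      intro hl
      rcases List.pairwise_cons.1 hl with ⟨hx, hrest⟩
      by_cases h : x = y
      · rw [pvDAdj, if_pos h]
        exact ih hrest
      · rw [pvDAdj, if_neg h]
        refine List.pairwise_cons.2 ⟨?_, ih hrest⟩
        intro z hz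
        rcases List.mem_cons.1 ((pvDAdj_mem z _).1 hz) with h1 | h1
        · exact h1 ▸ lt_of_le_of_ne (hx y (by simp)) h
        · exact lt_of_lt_of_le (lt_of_le_of_ne (hx y (by simp)) h) ((List.pairwise_cons.1 hrest).1 z h1)

-- indexing helpers for the bridges
theorem pvGetD_append_len (p r : List Char) (x : Char) :
    PySem.List.pyGetD (p ++ x :: r) (p.length : Int) ' ' = x := by
  simp [PySem.List.pyGetD_natCast, List.getD_eq_getElem?_getD, List.getElem?_append_right]

theorem pvGetD_append_len_add (p r : List Char) (x : Char) (k : Nat) :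
    PySem.List.pyGetD (p ++ x :: r) ((p.length : Int) + 1 + k) ' ' = r.getD k ' ' := by
  have : ((p.length : Int) + 1 + k) = ((p.length + 1 + k : Nat) : Int) := by push_cast; ring
  rw [this, PySem.List.pyGetD_natCast]
  rw [List.getD_eq_getElem?_getD, List.getElem?_append_right (by omega),
    show p.length + 1 + k - p.length = k + 1 by omega, List.getElem?_cons_succ,
    List.getD_eq_getElem?_getD]

theorem pvSet_append_len (p r : List Char) (x v : Char) :
    PySem.List.pySetD (p ++ x :: r) (p.length : Int) v = p ++ v :: r := by
  simp [PySem.List.pySetD_natCast, List.set_append, List.set_cons_zero]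

theorem pvSet_append_len_add (p r : List Char) (x v : Char) (k : Nat) :
    PySem.List.pySetD (p ++ x :: r) ((p.length : Int) + 1 + k) v = p ++ x :: r.set k v := by
  have : ((p.length : Int) + 1 + k) = ((p.length + 1 + k : Nat) : Int) := by push_cast; ring
  rw [this, PySem.List.pySetD_natCast]
  rw [List.set_append_right _ _ (by omega)]
  congr 1
  rw [show p.length + 1 + k - p.length = k + 1 by omega, List.set_cons_succ]

-- A's inner loop, structurally: state p ++ x :: q ++ ys, i = |p|, next index |p|+1+|q|
theorem pvInner_bridge (p : List Char) (ys : List Char) : ∀ (x : Char) (q : List Char),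
    (PySem.List.pyRange ((p.length : Int) + 1 + q.length)
        ((p.length : Int) + 1 + q.length + ys.length) 1).foldl (pvStepA (p.length : Int))
        (p ++ x :: q ++ ys)
      = p ++ (pvPass x ys).1 :: q ++ (pvPass x ys).2 := by
  induction ys with
  | nil => intro x q; simp [PySem.List.pyRange_one_eq_nil, pvPass]
  | cons y ys ih =>
    intro x q
    rw [PySem.List.pyRange_one_cons (by simp only [List.length_cons]; push_cast; omega)]
    simp only [List.foldl_cons]
    have hq : (q ++ y :: ys).getD q.length ' ' = y := by
      simp [List.getD_eq_getElem?_getD, List.getElem?_append_right]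
    have hstep : pvStepA (p.length : Int) (p ++ x :: q ++ y :: ys) ((p.length : Int) + 1 + q.length)
        = if y < x then p ++ y :: q ++ x :: ys else p ++ x :: q ++ y :: ys := by
      unfold pvStepA
      rw [show (p ++ x :: q ++ y :: ys) = p ++ x :: (q ++ y :: ys) by simp]
      rw [pvGetD_append_len, pvGetD_append_len_add p (q ++ y :: ys) x q.length, hq]
      by_cases hxy : y < x
      · rw [if_pos hxy, if_pos hxy, pvSet_append_len, pvSet_append_len_add p (q ++ y :: ys) y x q.length]
        simp [List.set_append, List.set_cons_zero]
      · rw [if_neg hxy, if_neg hxy]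
    rw [hstep]
    simp only [pvPass]
    split
    · have h3 := ih y (q ++ [x])
      simp only [List.length_append, List.length_cons, List.length_nil, Nat.cast_add,
        Nat.cast_one, Nat.cast_zero, List.append_assoc, List.singleton_append] at h3 ⊢
      ring_nf at h3 ⊢
      simpa using h3
    · have h3 := ih x (q ++ [y])
      simp only [List.length_append, List.length_cons, List.length_nil, Nat.cast_add,
        Nat.cast_one, Nat.cast_zero, List.append_assoc, List.singleton_append] at h3 ⊢
      ring_nf at h3 ⊢
      simpa using h3

-- A's outer loop, structurally
theorem pvOuter_bridge (m : Nat) : ∀ (rest p : List Char), rest.length = m →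
    (PySem.List.pyRange (p.length : Int) ((p.length : Int) + rest.length - 1) 1).foldl
        (fun s i => (PySem.List.pyRange (i + 1) ((p.length : Int) + rest.length) 1).foldl (pvStepA i) s)
        (p ++ rest)
      = p ++ pvSSort rest := by
  induction m with
  | zero =>
    intro rest p h
    rw [List.eq_nil_of_length_eq_zero h]
    simp [PySem.List.pyRange_one_eq_nil, pvSSort]
  | succ m ih =>
    intro rest p h
    match rest with
    | x :: ys =>
      by_cases hys : ys = []
      · subst hys
        simp [PySem.List.pyRange_one_eq_nil, pvSSort, pvPass]
      · have hlen : ys.length = m := by simpa using h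
        rw [PySem.List.pyRange_one_cons (by
          have : 0 < ys.length := List.length_pos_iff.2 hys
          push_cast; omega)]
        simp only [List.foldl_cons]
        have hinner := pvInner_bridge p ys x []
        simp only [List.length_nil, List.nil_append, Nat.cast_zero, add_zero, List.append_nil] at hinner
        rw [show ((p.length : Int) + (x :: ys).length) = (p.length : Int) + 1 + ys.length by push_cast; simp; ring] at *
        rw [show (p ++ x :: ys) = p ++ x :: [] ++ ys by simp] at *
        rw [hinner]
        have hthis := ih (pvPass x ys).2 (p ++ [(pvPass x ys).1]) (by rw [pvPass_length]; exact hlen)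
        simp only [List.length_append, List.length_cons, List.length_nil] at hthis
        rw [pvPass_length] at hthis
        push_cast at hthis ⊢
        rw [pvSSort, hthis]
        simp

-- A's dedup loop, structurally
theorem pvDedup_bridge : ∀ (rest p : List Char),
    pvDedupLoop (p ++ rest) (p.length : Int) ((p.length : Int) + rest.length) = p ++ pvDAdj rest := by
  intro rest
  induction rest with
  | nil => intro p; rw [pvDedupLoop]; simp [pvDAdj]
  | cons x ys ih =>
    intro p
    match ys with
    | [] =>
      rw [pvDedupLoop]
      simp [pvDAdj]
    | y :: ys' =>
      rw [pvDedupLoop, dif_pos (by push_cast; simp; omega)]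
      have hget1 : PySem.List.pyGetD (p ++ x :: y :: ys') (p.length : Int) ' ' = x :=
        pvGetD_append_len p (y :: ys') x
      have hget2 : PySem.List.pyGetD (p ++ x :: y :: ys') ((p.length : Int) + 1) ' ' = y := by
        have := pvGetD_append_len_add p (y :: ys') x 0
        simpa using this
      rw [hget1, hget2]
      split
      · rename_i heq
        have hpop : PySem.List.pop? (p ++ x :: y :: ys') (p.length : Int) = some (x, p ++ y :: ys') := by
          rw [PySem.List.pop?_natCast _ _ (by simp)]
          congr 1
          refine Prod.ext ?_ ?_
          · simp [List.getElem_append_right, Nat.sub_self]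
          · rw [List.eraseIdx_append_of_length_le (le_refl _)]
            simp [List.eraseIdx]
        rw [hpop]
        simp only [Option.map_some, Option.getD_some]
        have := ih p
        rw [show ((p.length : Int) + (x :: y :: ys').length - 1) = (p.length : Int) + (y :: ys').length by push_cast; simp; ring]
        rw [this, pvDAdj, if_pos heq]
      · rename_i hne
        have h4 := ih (p ++ [x])
        simp only [List.length_append, List.length_cons, List.length_nil] at h4
        rw [show (p ++ x :: y :: ys') = (p ++ [x]) ++ y :: ys' by simp]
        simp only [List.length_cons, List.length_append, List.length_nil] at h4 ⊢
        push_cast at h4 ⊢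
        ring_nf at h4 ⊢
        rw [h4, pvDAdj, if_neg hne]
        simp

-- B-side lemmas
theorem pvMem_insPos (c z : Char) (r : List Char) : z ∈ pvInsPos c r ↔ z = c ∨ z ∈ r := by
  induction r with
  | nil => simp [pvInsPos]
  | cons y ys ih => simp only [pvInsPos]; split <;> simp [ih] <;> tauto

theorem pvInsPos_sorted (c : Char) (r : List Char) (hr : r.Pairwise (· < ·)) (hc : c ∉ r) :
    (pvInsPos c r).Pairwise (· < ·) := by
  induction r with
  | nil => simp [pvInsPos]
  | cons y ys ih =>
    rcases List.pairwise_cons.1 hr with ⟨hy, hys⟩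
    simp only [pvInsPos]
    split
    · rename_i h
      refine List.pairwise_cons.2 ⟨?_, ih hys (by simp at hc; tauto)⟩
      intro z hz
      rcases (pvMem_insPos c z ys).1 hz with h1 | h1
      · exact h1 ▸ h
      · exact hy z h1
    · rename_i h
      have hcy : c < y := lt_of_le_of_ne (le_of_not_gt h) (by simp at hc; tauto)
      refine List.pairwise_cons.2 ⟨?_, hr⟩
      intro z hz
      rcases List.mem_cons.1 hz with h1 | h1
      · exact h1 ▸ hcy
      · exact lt_trans hcy (hy z h1)

theorem pvBFold_inv (cs : List Char) : ∀ (r : List Char), r.Pairwise (· < ·) →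
    ((cs.foldl (fun r c => if r.contains c then r else pvInsPos c r) r).Pairwise (· < ·) ∧
     ∀ z, z ∈ cs.foldl (fun r c => if r.contains c then r else pvInsPos c r) r ↔ z ∈ r ∨ z ∈ cs) := by
  induction cs with
  | nil => intro r hr; simp [hr]
  | cons c cs ih =>
    intro r hr
    simp only [List.foldl_cons]
    by_cases hmem : r.contains c
    · rw [if_pos hmem]
      rcases ih r hr with ⟨h1, h2⟩
      refine ⟨h1, fun z => ?_⟩
      rw [h2]
      simp only [List.mem_cons]
      constructor
      · tauto
      · rintro (h | h | h)
        · tauto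
        · left; rw [h]; exact List.contains_iff_mem.1 hmem
        · tauto
    · rw [if_neg hmem]
      have hnm : c ∉ r := fun h => hmem (List.contains_iff_mem.2 h)
      rcases ih (pvInsPos c r) (pvInsPos_sorted c r hr hnm) with ⟨h1, h2⟩
      refine ⟨h1, fun z => ?_⟩
      rw [h2, pvMem_insPos]
      simp only [List.mem_cons]
      tauto

-- sorted-(<) lists with the same members are equal
theorem pvSortedExt : ∀ (l₁ l₂ : List Char), l₁.Pairwise (· < ·) → l₂.Pairwise (· < ·) →
    (∀ z, z ∈ l₁ ↔ z ∈ l₂) → l₁ = l₂ := by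
  intro l₁
  induction l₁ with
  | nil =>
    intro l₂ _ _ hm
    cases l₂ with
    | nil => rfl
    | cons b t => exact absurd ((hm b).2 (by simp)) (by simp)
  | cons a t₁ ih =>
    intro l₂ h₁ h₂ hm
    cases l₂ with
    | nil => exact absurd ((hm a).1 (by simp)) (by simp)
    | cons b t₂ =>
      rcases List.pairwise_cons.1 h₁ with ⟨ha, ht₁⟩
      rcases List.pairwise_cons.1 h₂ with ⟨hb, ht₂⟩
      have hab : a = b := by
        rcases List.mem_cons.1 ((hm a).1 (by simp)) with h | h
        · exact h
        · rcases List.mem_cons.1 ((hm b).2 (by simp)) with h' | h'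
          · exact h'.symm
          · exact absurd (lt_trans (hb a h) (ha b h')) (lt_irrefl b)
      subst hab
      congr 1
      refine ih t₂ ht₁ ht₂ (fun z => ⟨fun hz => ?_, fun hz => ?_⟩)
      · rcases List.mem_cons.1 ((hm z).1 (List.mem_cons_of_mem a hz)) with h | h
        · exact absurd (h ▸ ha z hz) (lt_irrefl _)
        · exact h
      · rcases List.mem_cons.1 ((hm z).2 (List.mem_cons_of_mem a hz)) with h | h
        · exact absurd (h ▸ hb z hz) (lt_irrefl _)
        · exact h

-- ===== VERDICT (by name: the statement is the Claim_ definition above) =====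
theorem remove_duplicates_and_sort_spec : Claim_equal_remove_duplicates_and_sort := by
  intro s _
  unfold Spec_remove_duplicates_and_sort remove_duplicates_and_sort remove_duplicates_and_sort_alt
  have houter := pvOuter_bridge s.toList.length s.toList [] rfl
  simp only [List.length_nil, Nat.cast_zero, zero_add, List.nil_append] at houter
  rw [houter]
  have hlen : ((pvSSort s.toList).length : Int) = (s.toList.length : Int) := by
    exact_mod_cast congrArg (Nat.cast (R := Int)) (pvSSort_perm s.toList).length_eq
  have hdedup := pvDedup_bridge (pvSSort s.toList) []
  simp only [List.length_nil, Nat.cast_zero, zero_add, List.nil_append] at hdedup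
  rw [← hlen, hdedup]
  congr 1
  refine pvSortedExt _ _ (pvDAdj_sorted _ (pvSSort_sorted s.toList)) (pvBFold_inv s.toList [] (by simp)).1 (fun z => ?_)
  rw [pvDAdj_mem, (pvBFold_inv s.toList [] (by simp)).2]
  simp [(pvSSort_perm s.toList).mem_iff]
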